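-- pv_equiv track=rewrite | github.com/n0mad1k/isaac | backend/services/readiness_analysis.py | _get_bf_standard
-- ===== SOURCE A (Python) =====
-- from typing import List, Optional, Dict, Any, Tuple
--
-- ACE_BF_STANDARDS_MALE = {(17, 999): 24}
--
-- ACE_BF_STANDARDS_FEMALE = {(17, 999): 31}
--
-- def _get_bf_standard(age: Optional[int], is_female: bool) -> float:
--     """Get max allowable body fat % for age/gender (ACE fitness standards)"""
--     standards = ACE_BF_STANDARDS_FEMALE if is_female else ACE_BF_STANDARDS_MALE
--     if not age:
--         age = 30
--
--     for (min_age, max_age), max_bf in standards.items():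
--         if min_age <= age <= max_age:
--             return max_bf
--     return 24 if not is_female else 31
-- ===== SOURCE B (Python) =====
-- def _get_bf_standard(age, is_female):
--     """Get max allowable body fat % for age/gender (ACE fitness standards).
--     The single table range and the fallback agree, so the result is constant per gender."""
--     return 31 if is_female else 24
-- ===== Notes on version B (the rewrite author's own statement) =====
-- stated objective: simpler
-- what changed: B replaces the table lookup, age-defaulting and fallback with the closed form '31 if is_female else 24', which is what A computes for every age since the one table range and the fallback return the same per-gender constant.
import Mathlib
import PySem

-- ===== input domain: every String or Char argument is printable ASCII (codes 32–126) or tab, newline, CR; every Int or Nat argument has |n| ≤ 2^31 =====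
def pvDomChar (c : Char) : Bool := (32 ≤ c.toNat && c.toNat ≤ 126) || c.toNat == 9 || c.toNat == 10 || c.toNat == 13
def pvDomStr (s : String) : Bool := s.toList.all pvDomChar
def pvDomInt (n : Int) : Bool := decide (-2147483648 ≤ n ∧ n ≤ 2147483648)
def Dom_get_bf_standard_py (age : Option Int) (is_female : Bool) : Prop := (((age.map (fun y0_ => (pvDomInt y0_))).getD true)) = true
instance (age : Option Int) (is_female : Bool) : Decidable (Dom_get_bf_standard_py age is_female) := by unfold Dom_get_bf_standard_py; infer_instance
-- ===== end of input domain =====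

-- B replaces A's table scan + fallback with the per-gender constant (objective: simpler).

-- ===== PORT A =====
def aceBfStandardsMale : PySem.Dict (Int × Int) Int := PySem.Dict.ofList [((17, 999), 24)]
def aceBfStandardsFemale : PySem.Dict (Int × Int) Int := PySem.Dict.ofList [((17, 999), 31)]

def get_bf_standard_py (age : Option Int) (is_female : Bool) : Int :=
  let standards := if is_female then aceBfStandardsFemale else aceBfStandardsMale
  -- 'if not age: age = 30'  (None and 0 are falsy)
  let age : Int := match age with
    | none => 30
    | some a => if a = 0 then 30 else a
  -- 'for (min_age, max_age), max_bf in standards.items(): if min_age <= age <= max_age: return max_bf'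
  match standards.items.foldl (fun acc entry =>
      match acc with
      | some r => some r
      | none =>
        if entry.1.1 ≤ age ∧ age ≤ entry.1.2 then some entry.2 else none) none with
  | some r => r
  | none => if ¬ is_female then 24 else 31

-- ===== PORT B =====
def get_bf_standard_py_alt (age : Option Int) (is_female : Bool) : Int :=
  if is_female then 31 else 24

-- ===== PRECONDITION & SPEC =====
def Spec_get_bf_standard_py (age : Option Int) (is_female : Bool) (out : Int) : Prop := out = get_bf_standard_py_alt age is_female
instance (age : Option Int) (is_female : Bool) (out : Int) : Decidable (Spec_get_bf_standard_py age is_female out) := by unfold Spec_get_bf_standard_py; infer_instance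

-- ===== CLAIM (what is proved, stated in full; the proofs are below) =====
def Claim_equal_get_bf_standard_py : Prop := ∀ (age : Option Int) (is_female : Bool), Dom_get_bf_standard_py age is_female → Spec_get_bf_standard_py age is_female (get_bf_standard_py age is_female)

-- ===== LEMMAS AND PROOFS =====

-- ===== VERDICT (by name: the statement is the Claim_ definition above) =====
theorem get_bf_standard_py_spec : Claim_equal_get_bf_standard_py := by
  intro age is_female _
  have h24 : (PySem.Dict.ofList [(((17 : Int), (999 : Int)), (24 : Int))]).items
      = [((17, 999), 24)] := by decide
  have h31 : (PySem.Dict.ofList [(((17 : Int), (999 : Int)), (31 : Int))]).items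
      = [((17, 999), 31)] := by decide
  unfold Spec_get_bf_standard_py get_bf_standard_py get_bf_standard_py_alt
    aceBfStandardsMale aceBfStandardsFemale
  rcases age with _ | a <;> cases is_female <;>
    simp only [h24, h31, List.foldl] <;>
    repeat' split <;> simp_all <;> omega
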